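-- pv_equiv track=rewrite | github.com/ha-D/maleto | dasdo/utils/__init__.py | find_best_inc
-- ===== SOURCE A (Python) =====
-- def find_best_inc(price):
--     from math import floor, log
--     if price < 10:
--         return 1
--     if price < 100:
--         return 5
--     if price < 200:
--         return 20
--     if price < 1000:
--         return 50
--     if price < 10000:
--         return 200
--     return find_best_inc(price // 1000) * 1000
-- ===== SOURCE B (Python) =====
-- def find_best_inc(price):
--     count = 0
--     while price >= 10000:
--         price //= 1000
--         count += 1
--     if price < 10:
--         base = 1
--     elif price < 100:
--         base = 5
--     elif price < 200:
--         base = 20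
--     elif price < 1000:
--         base = 50
--     else:
--         base = 200
--     return base * 1000 ** count
-- ===== Notes on version B (the rewrite author's own statement) =====
-- stated objective: simpler
-- what changed: Replaces the tail recursion with an iterative reduce loop counting //1000 steps, then a flat if/elif cascade for the base increment and a single multiplication by 1000**count.
import Mathlib
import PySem

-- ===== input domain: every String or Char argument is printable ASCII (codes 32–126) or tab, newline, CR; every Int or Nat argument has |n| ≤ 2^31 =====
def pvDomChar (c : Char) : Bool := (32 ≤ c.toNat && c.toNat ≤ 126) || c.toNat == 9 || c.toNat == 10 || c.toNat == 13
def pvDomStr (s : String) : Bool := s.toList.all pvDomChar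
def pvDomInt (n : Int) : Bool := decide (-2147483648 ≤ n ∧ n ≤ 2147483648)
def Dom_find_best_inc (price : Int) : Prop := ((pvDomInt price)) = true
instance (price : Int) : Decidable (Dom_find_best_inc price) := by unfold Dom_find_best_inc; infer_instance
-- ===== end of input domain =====

-- B replaces A's tail recursion with an iterative reduce loop plus one base cascade and a power (objective: simpler).

-- ===== PORT A =====
def find_best_inc (price : Int) : Int :=
  if price < 10 then 1
  else if price < 100 then 5
  else if price < 200 then 20
  else if price < 1000 then 50
  else if price < 10000 then 200
  else find_best_inc (PySem.Int.floordiv price 1000) * 1000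
termination_by price.toNat
decreasing_by
  rw [PySem.Int.floordiv_eq_ediv_of_pos (by norm_num)]
  have h : price / 1000 < price := by
    rw [Int.ediv_lt_iff_lt_mul (by norm_num)]; nlinarith
  have h0 : 0 ≤ price / 1000 := Int.ediv_nonneg (by omega) (by norm_num)
  omega

-- ===== PORT B =====
-- the while loop: reduce price, counting the //1000 steps
def fbiReduce (price : Int) (count : Nat) : Int × Nat :=
  if 10000 ≤ price then fbiReduce (PySem.Int.floordiv price 1000) (count + 1)
  else (price, count)
termination_by price.toNat
decreasing_by
  rw [PySem.Int.floordiv_eq_ediv_of_pos (by norm_num)]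
  have h : price / 1000 < price := by
    rw [Int.ediv_lt_iff_lt_mul (by norm_num)]; nlinarith
  have h0 : 0 ≤ price / 1000 := Int.ediv_nonneg (by omega) (by norm_num)
  omega

-- the base if/elif cascade
def fbiBase (price : Int) : Int :=
  if price < 10 then 1
  else if price < 100 then 5
  else if price < 200 then 20
  else if price < 1000 then 50
  else 200

def find_best_inc_alt (price : Int) : Int :=
  let r := fbiReduce price 0
  fbiBase r.1 * 1000 ^ r.2

-- ===== PRECONDITION & SPEC =====
def Spec_find_best_inc (price : Int) (out : Int) : Prop := out = find_best_inc_alt price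
instance (price : Int) (out : Int) : Decidable (Spec_find_best_inc price out) := by unfold Spec_find_best_inc; infer_instance

-- ===== CLAIM (what is proved, stated in full; the proofs are below) =====
def Claim_equal_find_best_inc : Prop := ∀ (price : Int), Dom_find_best_inc price → Spec_find_best_inc price (find_best_inc price)

-- ===== LEMMAS AND PROOFS =====

lemma fbiReduce_spec (price : Int) (count : Nat) :
    fbiBase (fbiReduce price count).1 * 1000 ^ (fbiReduce price count).2
      = find_best_inc price * 1000 ^ count := by
  fun_induction fbiReduce price count with
  | case1 price count h ih =>
      rw [ih]
      rw [show find_best_inc price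
            = find_best_inc (PySem.Int.floordiv price 1000) * 1000 by
          rw [find_best_inc]
          simp only [if_neg (show ¬ price < 10 by omega), if_neg (show ¬ price < 100 by omega),
            if_neg (show ¬ price < 200 by omega), if_neg (show ¬ price < 1000 by omega),
            if_neg (show ¬ price < 10000 by omega)]]
      ring
  | case2 price count h =>
      simp only
      congr 1
      rw [find_best_inc, fbiBase]
      split_ifs <;> omega

-- ===== VERDICT (by name: the statement is the Claim_ definition above) =====
theorem find_best_inc_spec : Claim_equal_find_best_inc := by
  intro price _
  unfold Spec_find_best_inc find_best_inc_alt
  have := fbiReduce_spec price 0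
  simpa using this.symm
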